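-- pv_equiv track=rewrite | github.com/joseDanielRestrepoOrozco/generador-de-lenguajes | grammarToLanguage.py | generar_gramatica
-- ===== SOURCE A (Python) =====
-- def generar_gramatica(gramatica, simbolo = "S", max_profundidad = 5, profundidad = 0):
--     vt, vn, p = gramatica
--
--     if simbolo in vt:
--         return {simbolo}
--
--     if profundidad >= max_profundidad:
--         return {""}
--
--     if simbolo not in vn:
--         raise ValueError("reglas de produccion incorrecta, simbolo: " + simbolo)
--
--     resultados = set()
--
--     for produccion in p[simbolo]:
--         partes = produccion.split()
--         cadenas_actuales = {""}
--
--         for parte in partes: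
--             nuevas_cadenas = set()
--             subcadenas = generar_gramatica(gramatica=gramatica, simbolo=parte, max_profundidad=max_profundidad, profundidad=profundidad + 1)
--
--             for cadena in cadenas_actuales:
--                 for subcadena in subcadenas:
--                     nuevas_cadenas.add(cadena + subcadena)
--
--             cadenas_actuales = nuevas_cadenas
--
--         resultados.update(cadenas_actuales)
--
--     return resultados
-- ===== SOURCE B (Python) =====
-- def generar_gramatica(gramatica, simbolo="S", max_profundidad=5, profundidad=0):
--     vt, vn, p = gramatica
--     # Phase 1: collect, level by level, which symbols are needed at each remaining-depth budget.
--     levels = []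
--     frontier = {simbolo}
--     budget = max_profundidad - profundidad
--     while True:
--         levels.append((budget, frontier))
--         if budget <= 0:
--             break
--         nxt = set()
--         for s in frontier:
--             if s not in vt:
--                 for produccion in p.get(s, []):
--                     nxt.update(produccion.split())
--         if not nxt:
--             break
--         frontier = nxt
--         budget -= 1
--     # Phase 2: build the language table bottom-up, deepest level first; each needed
--     # (symbol, budget) pair is computed exactly once.
--     lang = {}
--     for b, front in reversed(levels):
--         cur = {}
--         for s in front:
--             if s in vt:
--                 cur[s] = {s}
--             elif b <= 0:
--                 cur[s] = {""}
--             elif s in vn: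
--                 res = set()
--                 for produccion in p[s]:
--                     acc = {""}
--                     for parte in produccion.split():
--                         acc = {x + y for x in acc for y in lang[parte]}
--                     res |= acc
--                 cur[s] = res
--             else:
--                 raise ValueError("reglas de produccion incorrecta, simbolo: " + s)
--         lang = cur
--     return lang[simbolo]
-- ===== Notes on version B (the rewrite author's own statement) =====
-- stated objective: alternative
-- what changed: B replaces A's top-down re-entrant recursion over derivation trees by a two-phase scheme: a level-by-level frontier scan that records which symbols are needed at each remaining-depth budget, then a bottom-up dynamic-programming pass that builds one language table per level (deepest first), so each needed (symbol, depth) language is computed exactly once instead of once per occurrence in the derivation tree.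
import Mathlib
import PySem

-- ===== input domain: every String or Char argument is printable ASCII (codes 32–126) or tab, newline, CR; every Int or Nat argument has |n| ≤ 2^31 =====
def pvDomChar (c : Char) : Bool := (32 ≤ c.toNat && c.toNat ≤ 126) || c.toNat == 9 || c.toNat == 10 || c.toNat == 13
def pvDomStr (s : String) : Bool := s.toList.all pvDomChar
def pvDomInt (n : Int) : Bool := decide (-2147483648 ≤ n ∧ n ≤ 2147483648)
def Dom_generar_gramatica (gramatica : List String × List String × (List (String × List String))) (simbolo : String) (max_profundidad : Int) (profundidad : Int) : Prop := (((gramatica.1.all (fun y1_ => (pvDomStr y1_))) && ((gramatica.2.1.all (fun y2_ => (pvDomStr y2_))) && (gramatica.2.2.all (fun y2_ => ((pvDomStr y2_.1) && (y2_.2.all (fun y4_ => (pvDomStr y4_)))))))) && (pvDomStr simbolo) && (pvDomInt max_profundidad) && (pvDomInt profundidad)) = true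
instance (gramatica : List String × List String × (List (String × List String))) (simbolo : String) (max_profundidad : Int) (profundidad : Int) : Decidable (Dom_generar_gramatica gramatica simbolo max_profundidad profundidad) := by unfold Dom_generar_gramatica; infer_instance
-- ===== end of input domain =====

-- B replaces A's top-down re-entrant recursion by a two-phase level scheme (frontier BFS, then a
-- bottom-up per-level language table), computing each needed (symbol, depth) once; return value only.

-- ===== PORT A =====
-- the inner double loop: nuevas_cadenas = set(); for cadena in cur: for subcadena in sub: add(cadena + subcadena)
def pvConcatProd (cur sub : List String) : List String :=
  cur.foldl (fun nv c => sub.foldl (fun nv2 sc => PySem.Set.add nv2 (c ++ sc)) nv) PySem.Set.empty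

-- A's recursion; the test 'profundidad >= max_profundidad' is represented by fuel = 0 with
-- fuel = (max_profundidad - profundidad).toNat (profundidad itself is only compared and incremented).
-- On the two raising branches (simbolo not in vn: ValueError; missing key: KeyError) — excluded by Pre_ — the port returns [].
def pvGenA (vt vn : List String) (p : List (String × List String)) : Nat → String → List String
  | fuel, s =>
    if s ∈ vt then PySem.Set.ofList [s]
    else
      match fuel with
      | 0 => [""]
      | f + 1 =>
        if s ∈ vn then
          ((PySem.Dict.get? (PySem.Dict.mk p) s).getD []).foldl (fun resultados produccion =>
            PySem.Set.update resultados
              ((PySem.Str.split₀ produccion).foldl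
                (fun cadenas parte => pvConcatProd cadenas (pvGenA vt vn p f parte))
                (PySem.Set.ofList [""]))) PySem.Set.empty
        else []

def generar_gramatica (gramatica : List String × List String × (List (String × List String))) (simbolo : String) (max_profundidad : Int) (profundidad : Int) : List String :=
  pvGenA gramatica.1 gramatica.2.1 gramatica.2.2 (max_profundidad - profundidad).toNat simbolo

-- ===== PORT B =====
-- {x + y for x in acc for y in sub}: the set of the concatenations, in comprehension order
def pvCross (acc sub : List String) : List String :=
  PySem.Set.ofList (acc.flatMap (fun x => sub.map (fun y => x ++ y)))

-- Phase 1 (the while-loop): the (budget, frontier) levels; Python's Int budget with its 'budget <= 0'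
-- test is represented by the Nat (max_profundidad - profundidad).toNat, so 'budget <= 0' is 'budget = 0'.
def pvLevelsB (vt : List String) (p : List (String × List String)) : Nat → List String → List (Nat × List String)
  | 0, frontier => [(0, frontier)]
  | b + 1, frontier =>
    let nxt : List String := frontier.foldl (fun acc s =>
      if s ∈ vt then acc
      else ((PySem.Dict.get? (PySem.Dict.mk p) s).getD []).foldl
        (fun a produccion => PySem.Set.update a (PySem.Str.split₀ produccion)) acc)
      PySem.Set.empty
    if nxt = [] then [(b + 1, frontier)]
    else (b + 1, frontier) :: pvLevelsB vt p b nxt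

-- Phase 2 body (one level): cur = {}; for s in front: cur[s] = …; the ValueError branch
-- (s not in vt ∪ vn with budget > 0) — excluded by Pre_ — is rendered as [].
def pvLevelLang (vt vn : List String) (p : List (String × List String))
    (lang : PySem.Dict String (List String)) (b : Nat) (front : List String) :
    PySem.Dict String (List String) :=
  front.foldl (fun cur s =>
    PySem.Dict.insert cur s
      (if s ∈ vt then PySem.Set.ofList [s]
       else if b = 0 then [""]
       else if s ∈ vn then
         ((PySem.Dict.get? (PySem.Dict.mk p) s).getD []).foldl (fun res produccion =>
           PySem.Set.update res ((PySem.Str.split₀ produccion).foldl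
             (fun acc parte => pvCross acc ((PySem.Dict.get? lang parte).getD []))
             (PySem.Set.ofList [""])))
           PySem.Set.empty
       else []))
    PySem.Dict.empty

-- 'for b, front in reversed(levels)' accumulating lang = foldr over levels; final 'lang[simbolo]'
-- (simbolo is in the first frontier, so the key is present; getD [] renders the lookup).
def generar_gramatica_alt (gramatica : List String × List String × (List (String × List String))) (simbolo : String) (max_profundidad : Int) (profundidad : Int) : List String :=
  let levels := pvLevelsB gramatica.1 gramatica.2.2 (max_profundidad - profundidad).toNat [simbolo]
  let lang := levels.foldr (fun lvl lang => pvLevelLang gramatica.1 gramatica.2.1 gramatica.2.2 lang lvl.1 lvl.2) PySem.Dict.empty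
  (PySem.Dict.get? lang simbolo).getD []

-- ===== PRECONDITION & SPEC =====
-- a symbol A cannot expand: neither a terminal nor a production-bearing member of vn (there A raises)
def pvBadSym (vt vn : List String) (p : List (String × List String)) (s : String) : Bool :=
  !vt.contains s && (!vn.contains s || (PySem.Dict.get? (PySem.Dict.mk p) s).isNone)

-- one expansion step of the reachable-symbol analysis: all tokens of all productions of the non-terminal members
def pvStepSyms (vt : List String) (p : List (String × List String)) (r : List String) : List String :=
  r.foldl (fun acc s =>
    if s ∈ vt then acc
    else ((PySem.Dict.get? (PySem.Dict.mk p) s).getD []).foldl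
      (fun a produccion => PySem.Set.update a (PySem.Str.split₀ produccion)) acc)
    PySem.Set.empty

-- cumulative reachable set after at most k expansions, stopping at the fixpoint (so it is cheap to
-- evaluate even for a huge depth budget; the fixpoint is reached once no new symbol appears)
def pvReachSyms (vt : List String) (p : List (String × List String)) : Nat → List String → List String
  | 0, r => r
  | k + 1, r =>
    let r' := PySem.Set.update r (pvStepSyms vt p r)
    if r' = r then r else pvReachSyms vt p k r'

-- Pre_ holds exactly on the inputs where A returns normally: A raises (ValueError or KeyError) iff some
-- symbol reachable from simbolo while the remaining depth budget is still positive (i.e. within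
-- max_profundidad - profundidad - 1 expansion steps) is neither a terminal nor a vn-symbol with an entry
-- in p.  This is the standard reachable-symbol fixpoint of the grammar, independent of both ports.
def Pre_generar_gramatica (gramatica : List String × List String × (List (String × List String))) (simbolo : String) (max_profundidad : Int) (profundidad : Int) : Prop :=
  (max_profundidad - profundidad).toNat = 0 ∨
    ∀ s ∈ pvReachSyms gramatica.1 gramatica.2.2 ((max_profundidad - profundidad).toNat - 1) [simbolo],
      pvBadSym gramatica.1 gramatica.2.1 gramatica.2.2 s = false
instance (gramatica : List String × List String × (List (String × List String))) (simbolo : String) (max_profundidad : Int) (profundidad : Int) : Decidable (Pre_generar_gramatica gramatica simbolo max_profundidad profundidad) := by unfold Pre_generar_gramatica; infer_instance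
def pvWitness_generar_gramatica : (List String × List String × (List (String × List String))) × String × Int × Int :=
  ((["a"], ["S"], [("S", ["a S", "a"])]), "S", 2, 0)
def Spec_generar_gramatica (gramatica : List String × List String × (List (String × List String))) (simbolo : String) (max_profundidad : Int) (profundidad : Int) (out : List String) : Prop := out = generar_gramatica_alt gramatica simbolo max_profundidad profundidad
instance (gramatica : List String × List String × (List (String × List String))) (simbolo : String) (max_profundidad : Int) (profundidad : Int) (out : List String) : Decidable (Spec_generar_gramatica gramatica simbolo max_profundidad profundidad out) := by unfold Spec_generar_gramatica; infer_instance

-- ===== CLAIM (what is proved, stated in full; the proofs are below) =====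
def Claim_equal_generar_gramatica : Prop := ∀ (gramatica : List String × List String × (List (String × List String))) (simbolo : String) (max_profundidad : Int) (profundidad : Int), Dom_generar_gramatica gramatica simbolo max_profundidad profundidad → Pre_generar_gramatica gramatica simbolo max_profundidad profundidad → Spec_generar_gramatica gramatica simbolo max_profundidad profundidad (generar_gramatica gramatica simbolo max_profundidad profundidad)

-- ===== LEMMAS AND PROOFS =====

-- the two renderings of Python's set-of-concatenations coincide
lemma pvCross_eq_pvConcatProd (acc sub : List String) : pvCross acc sub = pvConcatProd acc sub := by
  unfold pvCross pvConcatProd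
  rw [PySem.Set.ofList_eq_foldl, List.foldl_flatMap]
  simp only [List.foldl_map]
  rfl

-- a key not in the loop list keeps its binding
lemma pvGet?_foldl_insert_of_not_mem {ν : Type} (v : String → ν) :
    ∀ (fr : List String) (init : PySem.Dict String ν) (s : String), s ∉ fr →
      PySem.Dict.get? (fr.foldl (fun d t => PySem.Dict.insert d t (v t)) init) s = PySem.Dict.get? init s := by
  intro fr
  induction fr with
  | nil => intro init s _; rfl
  | cons t rest ih =>
    intro init s hs
    rw [List.foldl_cons, ih _ s (fun h => hs (List.mem_cons_of_mem _ h)),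
      PySem.Dict.get?_insert_of_ne _ _ (fun h => hs (by rw [h]; exact List.mem_cons_self))]

-- a key in the loop list ends bound to its value
lemma pvGet?_foldl_insert_of_mem {ν : Type} (v : String → ν) :
    ∀ (fr : List String) (init : PySem.Dict String ν) (s : String), s ∈ fr →
      PySem.Dict.get? (fr.foldl (fun d t => PySem.Dict.insert d t (v t)) init) s = some (v s) := by
  intro fr
  induction fr with
  | nil => intro _ _ h; exact absurd h (List.not_mem_nil)
  | cons t rest ih =>
    intro init s hs
    by_cases hr : s ∈ rest
    · rw [List.foldl_cons]; exact ih _ s hr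
    · have hst : s = t := by rcases List.mem_cons.mp hs with h | h; exact h; exact absurd h hr
      subst hst
      rw [List.foldl_cons, pvGet?_foldl_insert_of_not_mem v rest _ s hr,
        PySem.Dict.get?_insert_self]

-- membership is preserved by the token-collecting folds
lemma pvMem_foldl_update (prods : List String) :
    ∀ (a : List String) (y : String), y ∈ a →
      y ∈ prods.foldl (fun a produccion => PySem.Set.update a (PySem.Str.split₀ produccion)) a := by
  induction prods with
  | nil => intro a y h; exact h
  | cons q rest ih =>
    intro a y h
    exact ih _ y ((PySem.Set.mem_update _ _ _).mpr (Or.inl h))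

-- a token of a member production lands in the token-collecting fold
lemma pvMem_enter (prods : List String) :
    ∀ (a : List String) (prod : String), prod ∈ prods → ∀ tok ∈ PySem.Str.split₀ prod,
      tok ∈ prods.foldl (fun a produccion => PySem.Set.update a (PySem.Str.split₀ produccion)) a := by
  induction prods with
  | nil => intro _ _ h; exact absurd h (List.not_mem_nil)
  | cons q rest ih =>
    intro a prod hp tok ht
    simp only [List.foldl_cons]
    rcases List.mem_cons.mp hp with rfl | hp'
    · exact pvMem_foldl_update rest _ tok ((PySem.Set.mem_update _ _ _).mpr (Or.inr ht))
    · exact ih _ prod hp' tok ht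

-- membership is preserved by the frontier-expansion fold
lemma pvMem_foldl_F (vt : List String) (p : List (String × List String)) :
    ∀ (fr : List String) (acc : List String) (y : String), y ∈ acc →
      y ∈ fr.foldl (fun acc s =>
        if s ∈ vt then acc
        else ((PySem.Dict.get? (PySem.Dict.mk p) s).getD []).foldl
          (fun a produccion => PySem.Set.update a (PySem.Str.split₀ produccion)) acc) acc := by
  intro fr
  induction fr with
  | nil => intro _ _ h; exact h
  | cons t rest ih =>
    intro acc y hy
    simp only [List.foldl_cons]
    apply ih
    by_cases hvt : t ∈ vt
    · rw [if_pos hvt]; exact hy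
    · rw [if_neg hvt]; exact pvMem_foldl_update _ _ y hy

-- every token of every production of a non-terminal member of the frontier lands in nxt
lemma pvMem_nxt (vt : List String) (p : List (String × List String)) :
    ∀ (fr : List String) (acc : List String) (s : String), s ∈ fr → s ∉ vt →
      ∀ prod ∈ (PySem.Dict.get? (PySem.Dict.mk p) s).getD [], ∀ tok ∈ PySem.Str.split₀ prod,
        tok ∈ fr.foldl (fun acc s =>
          if s ∈ vt then acc
          else ((PySem.Dict.get? (PySem.Dict.mk p) s).getD []).foldl
            (fun a produccion => PySem.Set.update a (PySem.Str.split₀ produccion)) acc) acc := by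
  intro fr
  induction fr with
  | nil => intro _ _ h; exact fun h' => absurd h (List.not_mem_nil)
  | cons t rest ih =>
    intro acc s hs hvt prod hp tok ht
    simp only [List.foldl_cons]
    by_cases hsr : s ∈ rest
    · exact ih _ s hsr hvt prod hp tok ht
    · have hst : s = t := by rcases List.mem_cons.mp hs with h | h; exact h; exact absurd h hsr
      subst hst
      apply pvMem_foldl_F
      rw [if_neg hvt]
      exact pvMem_enter _ _ prod hp tok ht

-- the unfolding equation of pvLevelsB at a positive budget
lemma pvLevelsB_succ (vt : List String) (p : List (String × List String)) (b : Nat) (frontier : List String) :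
    pvLevelsB vt p (b + 1) frontier =
      (if (frontier.foldl (fun acc s =>
            if s ∈ vt then acc
            else ((PySem.Dict.get? (PySem.Dict.mk p) s).getD []).foldl
              (fun a produccion => PySem.Set.update a (PySem.Str.split₀ produccion)) acc)
            PySem.Set.empty) = []
       then [(b + 1, frontier)]
       else (b + 1, frontier) :: pvLevelsB vt p b
         (frontier.foldl (fun acc s =>
            if s ∈ vt then acc
            else ((PySem.Dict.get? (PySem.Dict.mk p) s).getD []).foldl
              (fun a produccion => PySem.Set.update a (PySem.Str.split₀ produccion)) acc)
            PySem.Set.empty)) := rfl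

-- lookup after one phase-2 level: a frontier symbol is bound to its per-level value
lemma pvGet?_levelLang (vt vn : List String) (p : List (String × List String))
    (lang : PySem.Dict String (List String)) (b : Nat) (front : List String) (s : String)
    (hs : s ∈ front) :
    PySem.Dict.get? (pvLevelLang vt vn p lang b front) s
      = some (if s ∈ vt then PySem.Set.ofList [s]
         else if b = 0 then [""]
         else if s ∈ vn then
           ((PySem.Dict.get? (PySem.Dict.mk p) s).getD []).foldl (fun res produccion =>
             PySem.Set.update res ((PySem.Str.split₀ produccion).foldl
               (fun acc parte => pvCross acc ((PySem.Dict.get? lang parte).getD []))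
               (PySem.Set.ofList [""])))
             PySem.Set.empty
         else []) := by
  unfold pvLevelLang
  exact pvGet?_foldl_insert_of_mem _ front _ s hs

-- main invariant: after phase 2 over the levels of (budget, frontier), every frontier symbol is
-- bound to exactly A's language at that budget
lemma pvB_correct (vt vn : List String) (p : List (String × List String)) :
    ∀ (budget : Nat) (frontier : List String) (s : String), s ∈ frontier →
      PySem.Dict.get? ((pvLevelsB vt p budget frontier).foldr
          (fun lvl lang => pvLevelLang vt vn p lang lvl.1 lvl.2) PySem.Dict.empty) s
        = some (pvGenA vt vn p budget s) := by
  intro budget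
  induction budget with
  | zero =>
    intro frontier s hs
    rw [pvLevelsB]
    simp only [List.foldr_cons, List.foldr_nil]
    rw [pvGet?_levelLang vt vn p _ _ frontier s hs, pvGenA]
    by_cases hvt : s ∈ vt <;> simp [hvt]
  | succ b ih =>
    intro frontier s hs
    rw [pvLevelsB_succ]
    by_cases hempty : (frontier.foldl (fun acc s =>
        if s ∈ vt then acc
        else ((PySem.Dict.get? (PySem.Dict.mk p) s).getD []).foldl
          (fun a produccion => PySem.Set.update a (PySem.Str.split₀ produccion)) acc)
        PySem.Set.empty) = []
    · -- 'if not nxt: break': a single remaining level, every production tokenless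
      have hsplit : ∀ (t : String), t ∉ vt →
          ∀ prod ∈ (PySem.Dict.get? (PySem.Dict.mk p) t).getD [],
            t ∈ frontier → PySem.Str.split₀ prod = [] := by
        intro t hvt prod hp htf
        rcases List.eq_nil_or_concat (PySem.Str.split₀ prod) with hnil | ⟨_, tok, _⟩
        · exact hnil
        · exfalso
          have htok : ∃ tok', tok' ∈ PySem.Str.split₀ prod := by
            rename_i hcat; exact ⟨tok, by rw [hcat]; simp⟩
          obtain ⟨tok', htok'⟩ := htok
          have := pvMem_nxt vt p frontier PySem.Set.empty t htf hvt prod hp tok' htok'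
          rw [hempty] at this
          exact absurd this (List.not_mem_nil)
      rw [if_pos hempty]
      simp only [List.foldr_cons, List.foldr_nil]
      rw [pvGet?_levelLang vt vn p _ _ frontier s hs, pvGenA]
      by_cases hvt : s ∈ vt
      · simp [hvt]
      · simp only [if_neg hvt, Nat.succ_ne_zero, if_false]
        by_cases hvn : s ∈ vn
        · simp only [if_pos hvn]
          congr 1
          apply PySem.List.foldl_congr_mem
          intro res prod hp
          rw [hsplit s hvt prod hp hs]
          rfl
        · simp only [if_neg hvn]
    · -- recursive level: the tail fold already holds A's languages at budget b
      rw [if_neg hempty]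
      simp only [List.foldr_cons]
      rw [pvGet?_levelLang vt vn p _ _ frontier s hs, pvGenA]
      by_cases hvt : s ∈ vt
      · simp [hvt]
      · simp only [if_neg hvt, Nat.succ_ne_zero, if_false]
        by_cases hvn : s ∈ vn
        · simp only [if_pos hvn]
          congr 1
          apply PySem.List.foldl_congr_mem
          intro res prod hp
          congr 1
          apply PySem.List.foldl_congr_mem
          intro acc parte hparte
          have htok := pvMem_nxt vt p frontier PySem.Set.empty s hs hvt prod hp parte hparte
          rw [ih _ parte htok, Option.getD_some, pvCross_eq_pvConcatProd]
        · simp only [if_neg hvn]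

-- ===== VERDICT (by name: the statement is the Claim_ definition above) =====
theorem generar_gramatica_spec : Claim_equal_generar_gramatica := by
  intro gramatica simbolo max_profundidad profundidad _ _
  unfold Spec_generar_gramatica generar_gramatica generar_gramatica_alt
  have h := pvB_correct gramatica.1 gramatica.2.1 gramatica.2.2
    (max_profundidad - profundidad).toNat [simbolo] simbolo (by simp)
  simp [h]
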